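-- pv_equiv track=rewrite | github.com/Nathanialc25/BlurryBlus | user_form_app/utils/related_artist.py | calculate_fair_distribution
-- ===== SOURCE A (Python) =====
-- def calculate_fair_distribution(num_artists, total_slots):
--     """Calculate how many related artists to get from each input artist"""
--     if num_artists == 0:
--         return []
--
--     # Base calculation: divide total slots as evenly as possible
--     base_count = total_slots // num_artists
--     remainder = total_slots % num_artists
--
--     distribution = []
--
--     for i in range(num_artists):
--         # Give extra slots to the first few artists if there's a remainder
--         count = base_count + (1 if i < remainder else 0)
--         distribution.append(count)
--
--     return distribution
-- ===== SOURCE B (Python) =====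
-- def calculate_fair_distribution(num_artists, total_slots):
--     """Calculate how many related artists to get from each input artist"""
--     distribution = []
--     remaining_artists, remaining_slots = num_artists, total_slots
--     while remaining_artists > 0:
--         # greedy: give this artist the ceiling of remaining slots / remaining artists
--         count = -((-remaining_slots) // remaining_artists)
--         distribution.append(count)
--         remaining_slots -= count
--         remaining_artists -= 1
--     return distribution
-- ===== Notes on version B (the rewrite author's own statement) =====
-- stated objective: alternative
-- what changed: Replaces the precomputed div/mod split (base count plus extra for the first 'remainder' indices) with a greedy one-pass loop that has no division precomputation: each step gives the current artist the ceiling of remaining_slots/remaining_artists and subtracts it, maintaining (remaining_artists, remaining_slots) state.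
import Mathlib
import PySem

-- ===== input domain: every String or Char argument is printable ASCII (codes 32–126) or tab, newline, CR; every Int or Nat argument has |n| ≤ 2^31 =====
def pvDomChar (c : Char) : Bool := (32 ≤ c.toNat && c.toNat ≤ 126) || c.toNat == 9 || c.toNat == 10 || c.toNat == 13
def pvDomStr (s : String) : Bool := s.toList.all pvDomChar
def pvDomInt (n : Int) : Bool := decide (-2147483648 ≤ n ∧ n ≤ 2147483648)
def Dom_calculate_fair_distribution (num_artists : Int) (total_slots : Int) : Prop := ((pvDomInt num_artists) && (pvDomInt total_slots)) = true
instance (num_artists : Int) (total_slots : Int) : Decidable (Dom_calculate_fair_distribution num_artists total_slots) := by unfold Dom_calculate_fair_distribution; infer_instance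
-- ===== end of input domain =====

-- B replaces A's precomputed div/mod index loop with a greedy one-pass loop (ceiling of remaining slots per remaining artist); alternative algorithm, same cost.


-- ===== PORT A =====
def calculate_fair_distribution (num_artists : Int) (total_slots : Int) : List Int :=
  if num_artists = 0 then []
  else
    let base_count := PySem.Int.floordiv total_slots num_artists
    let remainder := PySem.Int.mod total_slots num_artists
    (PySem.List.pyRange 0 num_artists 1).foldl
      (fun distribution i => distribution ++ [base_count + (if i < remainder then 1 else 0)]) []

-- ===== PORT B =====
-- the while loop of Source B: state (remaining_artists, remaining_slots), accumulator built head-first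
def cfdLoop (remaining_artists remaining_slots : Int) : List Int :=
  if remaining_artists > 0 then
    let count := -(PySem.Int.floordiv (-remaining_slots) remaining_artists)
    count :: cfdLoop (remaining_artists - 1) (remaining_slots - count)
  else []
termination_by remaining_artists.toNat
decreasing_by omega

def calculate_fair_distribution_alt (num_artists : Int) (total_slots : Int) : List Int :=
  cfdLoop num_artists total_slots

-- ===== PRECONDITION & SPEC =====
def Spec_calculate_fair_distribution (num_artists : Int) (total_slots : Int) (out : List Int) : Prop := out = calculate_fair_distribution_alt num_artists total_slots
instance (num_artists : Int) (total_slots : Int) (out : List Int) : Decidable (Spec_calculate_fair_distribution num_artists total_slots out) := by unfold Spec_calculate_fair_distribution; infer_instance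

-- ===== CLAIM (what is proved, stated in full; the proofs are below) =====
def Claim_equal_calculate_fair_distribution : Prop := ∀ (num_artists : Int) (total_slots : Int), Dom_calculate_fair_distribution num_artists total_slots → Spec_calculate_fair_distribution num_artists total_slots (calculate_fair_distribution num_artists total_slots)

-- ===== LEMMAS AND PROOFS =====

theorem map_pyRange_const (a b : Int) (f : Int → Int) (v : Int)
    (hf : ∀ i, a ≤ i → i < b → f i = v) :
    (PySem.List.pyRange a b 1).map f = List.replicate (b - a).toNat v := by
  rw [List.eq_replicate_iff]
  constructor
  · simp [PySem.List.length_pyRange_one]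
  · intro x hx
    simp only [List.mem_map] at hx
    obtain ⟨i, hi, rfl⟩ := hx
    rw [PySem.List.mem_pyRange_one] at hi
    exact hf i hi.1 hi.2

-- A (for n > 0) produces the block form: r copies of b+1 then n-r copies of b
theorem portA_blocks (n t : Int) (hn : 0 < n) :
    calculate_fair_distribution n t =
      List.replicate (PySem.Int.mod t n).toNat (PySem.Int.floordiv t n + 1) ++
        List.replicate (n - PySem.Int.mod t n).toNat (PySem.Int.floordiv t n) := by
  unfold calculate_fair_distribution
  simp only [show n ≠ 0 by omega, if_false]
  rw [PySem.List.foldl_append_singleton_eq_map]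
  set b := PySem.Int.floordiv t n
  set r := PySem.Int.mod t n
  have hr0 : 0 ≤ r := PySem.Int.mod_nonneg t hn
  have hrn : r < n := PySem.Int.mod_lt t hn
  rw [PySem.List.pyRange_one_append 0 r n hr0 (le_of_lt hrn), List.map_append]
  rw [map_pyRange_const 0 r _ (b + 1) (fun i _ h2 => by simp [h2]),
      map_pyRange_const r n _ b (fun i h1 _ => by simp [not_lt.2 h1])]
  norm_num

-- the greedy loop of B produces the same block form
theorem cfdLoop_blocks (k : Nat) : ∀ (n t : Int), n.toNat = k → 0 < n →
    cfdLoop n t =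
      List.replicate (PySem.Int.mod t n).toNat (PySem.Int.floordiv t n + 1) ++
        List.replicate (n - PySem.Int.mod t n).toNat (PySem.Int.floordiv t n) := by
  induction k with
  | zero => intro n t hk hn; omega
  | succ k ih =>
    intro n t hk hn
    set b := PySem.Int.floordiv t n with hb
    set r := PySem.Int.mod t n with hr
    have hr0 : 0 ≤ r := PySem.Int.mod_nonneg t hn
    have hrn : r < n := PySem.Int.mod_lt t hn
    have ht : b * n + r = t := PySem.Int.floordiv_mul_add_mod t n
    rw [cfdLoop, if_pos hn]
    by_cases hrz : r = 0
    · -- ceiling = b, tail is n-1 copies of b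
      have hc : -(PySem.Int.floordiv (-t) n) = b := by
        rw [PySem.Int.neg_floordiv_neg_eq_iff_of_pos hn]
        constructor <;> nlinarith
      rw [hc]
      show b :: cfdLoop (n - 1) (t - b) = _
      by_cases h1 : n = 1
      · rw [cfdLoop, if_neg (by omega)]; simp [h1, hrz]
      · have hn1 : 0 < n - 1 := by omega
        have hb' : PySem.Int.floordiv (t - b) (n - 1) = b := by
          rw [PySem.Int.floordiv_eq_iff_of_pos hn1]
          constructor <;> nlinarith
        have hr' : PySem.Int.mod (t - b) (n - 1) = 0 := by
          have := PySem.Int.floordiv_mul_add_mod (t - b) (n - 1)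
          rw [hb'] at this; nlinarith
        rw [ih (n - 1) (t - b) (by omega) hn1, hb', hr', hrz]
        simp only [Int.toNat_zero, List.replicate_zero, List.nil_append]
        rw [show (n - 0).toNat = (n - 1 - 0).toNat + 1 by omega, List.replicate_succ]
    · -- r > 0: ceiling = b + 1, remainder drops by one
      have hrpos : 0 < r := lt_of_le_of_ne hr0 (Ne.symm hrz)
      have hc : -(PySem.Int.floordiv (-t) n) = b + 1 := by
        rw [PySem.Int.neg_floordiv_neg_eq_iff_of_pos hn]
        constructor <;> nlinarith
      rw [hc]
      have hn1 : 0 < n - 1 := by omega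
      have hb' : PySem.Int.floordiv (t - (b + 1)) (n - 1) = b := by
        rw [PySem.Int.floordiv_eq_iff_of_pos hn1]
        constructor <;> nlinarith
      have hr' : PySem.Int.mod (t - (b + 1)) (n - 1) = r - 1 := by
        have := PySem.Int.floordiv_mul_add_mod (t - (b + 1)) (n - 1)
        rw [hb'] at this; nlinarith
      show (b + 1) :: cfdLoop (n - 1) (t - (b + 1)) = _
      rw [ih (n - 1) (t - (b + 1)) (by omega) hn1, hb', hr']
      rw [show r.toNat = (r - 1).toNat + 1 by omega, List.replicate_succ,
          show (n - r).toNat = (n - 1 - (r - 1)).toNat by omega]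
      simp

-- ===== VERDICT =====
theorem calculate_fair_distribution_spec : Claim_equal_calculate_fair_distribution := by
  intro n t _
  unfold Spec_calculate_fair_distribution calculate_fair_distribution_alt
  by_cases hn : 0 < n
  · rw [portA_blocks n t hn, cfdLoop_blocks n.toNat n t rfl hn]
  · rw [cfdLoop, if_neg (by omega)]
    unfold calculate_fair_distribution
    by_cases h0 : n = 0
    · simp [h0]
    · simp only [h0, if_false]
      rw [PySem.List.pyRange_one_eq_nil (by omega)]
      simp
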